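-- pv_equiv track=rewrite | github.com/ramighanem1/madlib-cli | madlib_cli/madlib.py | parse_template
-- ===== SOURCE A (Python) =====
-- def parse_template(template):
--     parts = []
--     stripped = ""
--     start = 0
--     while True:
--         left_brace = template.find("{", start)
--         if left_brace == -1:
--             stripped += template[start:]
--             break
--         right_brace = template.find("}", left_brace)
--         if right_brace == -1:
--             stripped += template[start:]
--             break
--         parts.append(template[left_brace + 1:right_brace])
--         stripped += template[start:left_brace] + "{}"
--         start = right_brace + 1
--     return stripped, tuple(parts)
-- ===== SOURCE B (Python) =====
-- def parse_template(template):
--     # Single left-to-right character scan with an explicit in-placeholder state,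
--     # instead of repeated str.find calls with an index.
--     out = []
--     parts = []
--     buf = None  # None = outside a placeholder; else chars seen since the '{'
--     for ch in template:
--         if buf is None:
--             if ch == '{':
--                 buf = []
--             else:
--                 out.append(ch)
--         else:
--             if ch == '}':
--                 parts.append(''.join(buf))
--                 out.append('{}')
--                 buf = None
--             else:
--                 buf.append(ch)
--     if buf is not None:
--         out.append('{' + ''.join(buf))
--     return ''.join(out), tuple(parts)
-- ===== Notes on version B (the rewrite author's own statement) =====
-- stated objective: alternative
-- what changed: Replaced A's repeated str.find calls with index/slice bookkeeping by a single left-to-right character scan that keeps an explicit in-placeholder buffer state.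
import Mathlib
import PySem

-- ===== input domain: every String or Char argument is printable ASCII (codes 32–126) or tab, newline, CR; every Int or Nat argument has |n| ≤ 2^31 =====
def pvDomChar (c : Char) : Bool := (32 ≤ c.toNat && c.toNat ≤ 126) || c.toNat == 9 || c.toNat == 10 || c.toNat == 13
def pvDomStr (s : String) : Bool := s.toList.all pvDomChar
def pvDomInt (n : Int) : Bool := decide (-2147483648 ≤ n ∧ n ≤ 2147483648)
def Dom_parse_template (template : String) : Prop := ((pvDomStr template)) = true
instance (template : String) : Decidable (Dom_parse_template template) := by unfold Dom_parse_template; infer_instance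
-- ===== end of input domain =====

-- B replaces A's repeated str.find/slice loop by a single left-to-right character
-- scan with an explicit in-placeholder state (objective: alternative one-pass scan).

-- ===== PORT A =====
-- A's `while True` loop; fuel `t.length + 1` suffices since `start` strictly grows each iteration.
def parseLoopA (t : List Char) : Nat → Nat → List Char → List (List Char) → List Char × List (List Char)
  | 0, start, stripped, parts => (stripped ++ PySem.List.slice t (some (start : Int)) none, parts)
  | fuel + 1, start, stripped, parts =>
    let lb := PySem.Chars.findFrom t ['{'] (start : Int) none
    if lb = -1 then (stripped ++ PySem.List.slice t (some (start : Int)) none, parts)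
    else
      let rb := PySem.Chars.findFrom t ['}'] lb none
      if rb = -1 then (stripped ++ PySem.List.slice t (some (start : Int)) none, parts)
      else
        parseLoopA t fuel (rb.toNat + 1)
          (stripped ++ PySem.List.slice t (some (start : Int)) (some lb) ++ ['{', '}'])
          (parts ++ [PySem.List.slice t (some (lb + 1)) (some rb)])

def parse_template (template : String) : String × List String :=
  let r := parseLoopA template.toList (template.toList.length + 1) 0 [] []
  (String.ofList r.1, r.2.map String.ofList)

-- ===== PORT B =====
def stepB (st : List Char × List (List Char) × Option (List Char)) (ch : Char) :
    List Char × List (List Char) × Option (List Char) :=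
  match st with
  | (out, parts, none) =>
    if ch = '{' then (out, parts, some []) else (out ++ [ch], parts, none)
  | (out, parts, some buf) =>
    if ch = '}' then (out ++ ['{', '}'], parts ++ [buf], none)
    else (out, parts, some (buf ++ [ch]))

def parse_template_alt (template : String) : String × List String :=
  match template.toList.foldl stepB ([], [], none) with
  | (out, parts, none) => (String.ofList out, parts.map String.ofList)
  | (out, parts, some buf) => (String.ofList (out ++ '{' :: buf), parts.map String.ofList)

-- ===== PRECONDITION & SPEC =====
def Spec_parse_template (template : String) (out : String × List String) : Prop := out = parse_template_alt template
instance (template : String) (out : String × List String) : Decidable (Spec_parse_template template out) := by unfold Spec_parse_template; infer_instance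

-- ===== CLAIM (what is proved, stated in full; the proofs are below) =====
def Claim_equal_parse_template : Prop := ∀ (template : String), Dom_parse_template template → Spec_parse_template template (parse_template template)

-- ===== LEMMAS AND PROOFS =====

-- finalize step of B after the fold
def finB (st : List Char × List (List Char) × Option (List Char)) : List Char × List (List Char) :=
  match st with
  | (out, parts, none) => (out, parts)
  | (out, parts, some buf) => (out ++ '{' :: buf, parts)

theorem fold_no_lbrace (s : List Char) (h : '{' ∉ s) : ∀ (out : List Char) (parts : List (List Char)),
    s.foldl stepB (out, parts, none) = (out ++ s, parts, none) := by
  induction s with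
  | nil => simp
  | cons c s ih =>
    intro out parts
    simp only [List.mem_cons, not_or] at h
    have hne : c ≠ '{' := fun hc => h.1 hc.symm
    rw [List.foldl_cons, show stepB (out, parts, none) c = (out ++ [c], parts, none) by
      simp [stepB, hne], ih h.2]
    simp

theorem fold_in_buf (s : List Char) (h : '}' ∉ s) : ∀ (out : List Char) (parts : List (List Char)) (buf : List Char),
    s.foldl stepB (out, parts, some buf) = (out, parts, some (buf ++ s)) := by
  induction s with
  | nil => simp
  | cons c s ih =>
    intro out parts buf
    simp only [List.mem_cons, not_or] at h
    have hne : c ≠ '}' := fun hc => h.1 hc.symm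
    rw [List.foldl_cons, show stepB (out, parts, some buf) c = (out, parts, some (buf ++ [c])) by
      simp [stepB, hne], ih h.2]
    simp

theorem find_char_neg (s : List Char) (c : Char) (h : c ∉ s) : PySem.Chars.find s [c] = -1 := by
  rw [PySem.Chars.find_eq_neg_one_iff, List.singleton_infix_iff]
  exact h

theorem singleton_prefix_drop (s : List Char) (c : Char) (i : Nat) :
    [c] <+: s.drop i ↔ s[i]? = some c := by
  have h0 : s[i]? = (s.drop i)[0]? := by simp
  rw [h0]
  cases hd : s.drop i with
  | nil => simp
  | cons a l =>
    simp only [List.cons_prefix_cons, List.nil_prefix, and_true, List.getElem?_cons_zero,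
      Option.some.injEq]
    constructor <;> (intro h; simp [h])

theorem find_char_split (pre suf : List Char) (c : Char) (hpre : c ∉ pre) :
    PySem.Chars.find (pre ++ c :: suf) [c] = (pre.length : Int) := by
  have hnn : 0 ≤ PySem.Chars.find (pre ++ c :: suf) [c] := by
    rw [PySem.Chars.find_nonneg_iff, List.singleton_infix_iff]
    simp
  obtain ⟨h1, h2⟩ := PySem.Chars.find_spec (s := pre ++ c :: suf) (sub := [c]) hnn
  set n := (PySem.Chars.find (pre ++ c :: suf) [c]).toNat with hn
  rw [singleton_prefix_drop] at h1
  have hple : ¬ (pre.length < n) := by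
    intro hlt
    have h3 := h2 pre.length hlt
    rw [singleton_prefix_drop] at h3
    exact h3 (by simp)
  have hnle : ¬ (n < pre.length) := by
    intro hlt
    have h4 : (pre ++ c :: suf)[n]? = some pre[n] := by
      rw [List.getElem?_append_left (by omega)]
      exact List.getElem?_eq_getElem hlt
    rw [h4, Option.some.injEq] at h1
    exact hpre (h1 ▸ pre.getElem_mem hlt)
  omega

theorem exists_first_split (c : Char) (l : List Char) (h : c ∈ l) :
    ∃ pre suf, l = pre ++ c :: suf ∧ c ∉ pre := by
  induction l with
  | nil => simp at h
  | cons a l ih =>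
    by_cases hac : a = c
    · exact ⟨[], l, by simp [hac], by simp⟩
    · have h' : c ∈ l := by
        rcases List.mem_cons.mp h with h1 | h1
        · exact absurd h1.symm hac
        · exact h1
      rcases ih h' with ⟨pre, suf, hs, hp⟩
      refine ⟨a :: pre, suf, by simp [hs], ?_⟩
      simp only [List.mem_cons, not_or]
      exact ⟨fun hc => hac hc.symm, hp⟩

-- the main loop invariant: A's loop from `start` equals B's scan of the suffix
theorem mainA (fuel : Nat) : ∀ (t : List Char) (start : Nat) (out : List Char) (parts : List (List Char)),
    start ≤ t.length → t.length - start < fuel →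
    parseLoopA t fuel start out parts = finB ((t.drop start).foldl stepB (out, parts, none)) := by
  induction fuel with
  | zero => intro t start out parts hs hf; omega
  | succ fuel ih =>
    intro t start out parts hs hf
    by_cases hb : '{' ∈ t.drop start
    · rcases exists_first_split '{' _ hb with ⟨pre, suf, hsplit, hpre⟩
      have hlen : t.length - start = pre.length + suf.length + 1 := by
        have := congrArg List.length hsplit
        simp [List.length_drop] at this
        omega
      have hfind1 : PySem.Chars.find (t.drop start) ['{'] = (pre.length : Int) :=
        hsplit ▸ find_char_split pre suf '{' hpre
      have hlb : PySem.Chars.findFrom t ['{'] (start : Int) none = ((start + pre.length : Nat) : Int) := by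
        rw [PySem.Chars.findFrom_natCast t ['{'] start hs, hfind1, if_neg (by omega)]
        push_cast
        ring
      have hdrop1 : t.drop (start + pre.length) = '{' :: suf := by
        rw [← List.drop_drop, hsplit]
        simp
      by_cases hc : '}' ∈ suf
      · rcases exists_first_split '}' _ hc with ⟨mid, rest, hs2, hmid⟩
        have hlen2 : suf.length = mid.length + rest.length + 1 := by
          have := congrArg List.length hs2; simp at this; omega
        have hfind2 : PySem.Chars.find (t.drop (start + pre.length)) ['}'] = ((mid.length + 1 : Nat) : Int) := by
          rw [hdrop1, hs2, show '{' :: (mid ++ '}' :: rest) = ('{' :: mid) ++ '}' :: rest from rfl,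
            find_char_split ('{' :: mid) rest '}' (by simp [hmid])]
          simp
        have hrb : PySem.Chars.findFrom t ['}'] ((start + pre.length : Nat) : Int) none
            = ((start + pre.length + mid.length + 1 : Nat) : Int) := by
          rw [PySem.Chars.findFrom_natCast t ['}'] (start + pre.length) (by omega), hfind2,
            if_neg (by omega)]
          push_cast
          ring
        -- reduce A's step
        unfold parseLoopA
        simp only [hlb, hrb]
        rw [if_neg (by omega), if_neg (by omega)]
        have hslice1 : PySem.List.slice t (some ((start : Nat) : Int)) (some ((start + pre.length : Nat) : Int)) = pre := by
          rw [PySem.List.slice_natCast, hsplit, show start + pre.length - start = pre.length by omega]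
          simp
        have hdrop2 : t.drop (start + pre.length + 1) = suf := by
          rw [show start + pre.length + 1 = start + (pre.length + 1) by ring, ← List.drop_drop,
            hsplit, show pre ++ '{' :: suf = (pre ++ ['{']) ++ suf by simp,
            List.drop_left' (by simp)]
        have hslice2 : PySem.List.slice t (some (((start + pre.length : Nat) : Int) + 1))
            (some ((start + pre.length + mid.length + 1 : Nat) : Int)) = mid := by
          rw [show (((start + pre.length : Nat) : Int) + 1) = ((start + pre.length + 1 : Nat) : Int) by push_cast; ring,
            PySem.List.slice_natCast, hdrop2, hs2,
            show start + pre.length + mid.length + 1 - (start + pre.length + 1) = mid.length by omega,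
            show mid ++ '}' :: rest = mid ++ ('}' :: rest) from rfl]
          simp
        rw [hslice1, hslice2,
          show (((start + pre.length + mid.length + 1 : Nat) : Int)).toNat = start + pre.length + mid.length + 1 by omega]
        -- apply the induction hypothesis at the new start
        rw [ih t (start + pre.length + mid.length + 1 + 1) _ _ (by omega) (by omega)]
        -- reduce B's fold over the same suffix
        have hdropnew : t.drop (start + pre.length + mid.length + 1 + 1) = rest := by
          rw [show start + pre.length + mid.length + 1 + 1 = (start + pre.length + 1) + (mid.length + 1) by ring,
            ← List.drop_drop, hdrop2, hs2,
            show mid ++ '}' :: rest = (mid ++ ['}']) ++ rest by simp,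
            List.drop_left' (by simp)]
        rw [hsplit, hs2, hdropnew,
          show pre ++ '{' :: (mid ++ '}' :: rest) = (pre ++ '{' :: mid ++ ['}']) ++ rest by simp,
          List.foldl_append]
        congr 1
        rw [show pre ++ '{' :: mid ++ ['}'] = pre ++ ('{' :: (mid ++ ['}'])) by simp,
          List.foldl_append, fold_no_lbrace pre hpre, List.foldl_cons,
          show stepB (out ++ pre, parts, none) '{' = (out ++ pre, parts, some []) by simp [stepB],
          List.foldl_append, fold_in_buf mid hmid, List.foldl_cons]
        simp [stepB]
      · -- '{' found but no '}' after it: A breaks copying the tail; B finishes inside the buffer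
        have hfind2 : PySem.Chars.find (t.drop (start + pre.length)) ['}'] = -1 := by
          rw [hdrop1]
          exact find_char_neg _ _ (by simp [hc])
        have hrb : PySem.Chars.findFrom t ['}'] ((start + pre.length : Nat) : Int) none = -1 := by
          rw [PySem.Chars.findFrom_natCast t ['}'] (start + pre.length) (by omega), hfind2]
          simp
        unfold parseLoopA
        simp only [hlb, hrb]
        rw [if_pos trivial, PySem.List.slice_from_natCast, hsplit,
          List.foldl_append, fold_no_lbrace pre hpre, List.foldl_cons,
          show stepB (out ++ pre, parts, none) '{' = (out ++ pre, parts, some []) by simp [stepB],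
          fold_in_buf suf hc]
        simp [finB]
    · -- no '{' left: both sides copy the tail
      have hlb : PySem.Chars.findFrom t ['{'] (start : Int) none = -1 := by
        rw [PySem.Chars.findFrom_natCast t ['{'] start hs, find_char_neg _ _ hb]
        simp
      unfold parseLoopA
      simp only [hlb]
      rw [if_pos trivial, PySem.List.slice_from_natCast, fold_no_lbrace _ hb]
      simp [finB]

-- ===== VERDICT (by name: the statement is the Claim_ definition above) =====
theorem parse_template_spec : Claim_equal_parse_template := by
  intro template _
  unfold Spec_parse_template parse_template parse_template_alt
  rw [mainA _ template.toList 0 [] [] (by omega) (by omega)]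
  simp only [List.drop_zero]
  rcases h : template.toList.foldl stepB ([], [], none) with ⟨o, p, b⟩
  cases b <;> simp [finB]
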